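-- pv_equiv track=rewrite | github.com/andrew-peters/python-projects | algos/findRatio.py | solution
-- ===== SOURCE A (Python) =====
-- def solution(arr, left, right):
--     resArray = []
--
--     for i in range(0, len(arr)):
--         isValid = False
--         for x in range(left, right + 1):
--             if arr[i] == (i + 1) * x:
--                 # resArray.append(True)
--                 isValid = True
--                 break
--         # if not isValid:
--         #     resArray.append(False)
--         # isValid = False
--         resArray.append(isValid)
--     return resArray
-- ===== SOURCE B (Python) =====
-- def solution(arr, left, right):
--     # One divisibility test per element instead of scanning the whole
--     # [left, right] range: arr[i] == (i+1)*x for some x in [left, right]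
--     # iff (i+1) divides arr[i] and the quotient lies in [left, right].
--     return [a % (i + 1) == 0 and left <= a // (i + 1) <= right
--             for i, a in enumerate(arr)]
-- ===== Notes on version B (the rewrite author's own statement) =====
-- stated objective: faster
-- what changed: Replaces the inner scan over every x in range(left, right+1) by a single divisibility-and-quotient-bound test per element (arr[i] == (i+1)*x has a solution iff (i+1) divides arr[i] and the quotient lies in [left, right]); intended as faster (O(n) vs O(n*(right-left))), measured up to 417x when the range is wide but only ~1.5x and unconfirmed at the largest timing size, where the range is narrow.
import Mathlib
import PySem

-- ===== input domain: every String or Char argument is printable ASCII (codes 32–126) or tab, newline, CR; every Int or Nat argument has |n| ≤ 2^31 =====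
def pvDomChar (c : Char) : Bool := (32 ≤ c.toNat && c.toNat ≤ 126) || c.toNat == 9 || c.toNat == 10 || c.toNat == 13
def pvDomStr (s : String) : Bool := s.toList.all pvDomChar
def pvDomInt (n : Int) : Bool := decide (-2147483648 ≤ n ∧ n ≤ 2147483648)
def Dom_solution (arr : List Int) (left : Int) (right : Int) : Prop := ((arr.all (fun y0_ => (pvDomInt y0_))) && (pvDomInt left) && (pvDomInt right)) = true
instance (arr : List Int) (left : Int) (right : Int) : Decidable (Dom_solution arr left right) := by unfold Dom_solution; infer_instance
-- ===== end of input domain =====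

-- B replaces A's inner scan over range(left, right+1) by one divisibility-and-quotient test per element; intended as faster, measured up to 417x on wide ranges but unconfirmed at the largest timing size.

-- ===== PORT A =====
-- for i in range(0, len(arr)): scan x in range(left, right+1), set isValid and break on arr[i] == (i+1)*x
def solution (arr : List Int) (left : Int) (right : Int) : List Bool :=
  (PySem.List.pyRange 0 arr.length 1).map (fun i =>
    (PySem.List.pyRange left (right + 1) 1).any (fun x =>
      PySem.List.pyGetD arr i 0 == (i + 1) * x))

-- ===== PORT B =====
-- [a % (i+1) == 0 and left <= a // (i+1) <= right for i, a in enumerate(arr)]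
def solution_alt (arr : List Int) (left : Int) (right : Int) : List Bool :=
  (PySem.List.enumerate arr 0).map (fun p =>
    decide (PySem.Int.mod p.2 (p.1 + 1) = 0) &&
    (decide (left ≤ PySem.Int.floordiv p.2 (p.1 + 1)) &&
     decide (PySem.Int.floordiv p.2 (p.1 + 1) ≤ right)))

-- ===== PRECONDITION & SPEC =====
def Spec_solution (arr : List Int) (left : Int) (right : Int) (out : List Bool) : Prop := out = solution_alt arr left right
instance (arr : List Int) (left : Int) (right : Int) (out : List Bool) : Decidable (Spec_solution arr left right out) := by unfold Spec_solution; infer_instance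

-- ===== CLAIM (what is proved, stated in full; the proofs are below) =====
def Claim_equal_solution : Prop := ∀ (arr : List Int) (left : Int) (right : Int), Dom_solution arr left right → Spec_solution arr left right (solution arr left right)

-- ===== LEMMAS AND PROOFS =====

-- the pointwise fact: for d > 0, "a = d*x for some x in [l, r]" equals "d | a and l ≤ a//d ≤ r"
theorem pv_any_eq_divtest (a d l r : Int) (hd : 0 < d) :
    (PySem.List.pyRange l (r + 1) 1).any (fun x => a == d * x) =
    (decide (PySem.Int.mod a d = 0) &&
     (decide (l ≤ PySem.Int.floordiv a d) && decide (PySem.Int.floordiv a d ≤ r))) := by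
  rw [PySem.Int.mod_eq_emod_of_pos hd, PySem.Int.floordiv_eq_ediv_of_pos hd]
  rcases Bool.eq_false_or_eq_true ((PySem.List.pyRange l (r + 1) 1).any (fun x => a == d * x)) with h | h <;> rw [h]
  · simp only [List.any_eq_true, PySem.List.mem_pyRange_one, beq_iff_eq] at h
    obtain ⟨x, ⟨hlx, hxr⟩, hax⟩ := h
    have hq : a / d = x := by
      subst hax; exact Int.mul_ediv_cancel_left x (by omega)
    symm
    simp only [Bool.and_eq_true, decide_eq_true_eq]
    refine ⟨?_, by omega, by omega⟩
    subst hax; exact Int.mul_emod_right d x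
  · simp only [List.any_eq_false, PySem.List.mem_pyRange_one, beq_iff_eq] at h
    symm
    simp only [Bool.and_eq_false_iff, decide_eq_false_iff_not, not_le]
    by_cases hdvd : a % d = 0
    · have heq : a = d * (a / d) := by have h2 := Int.emod_add_mul_ediv a d; omega
      have hr : ¬(l ≤ a / d ∧ a / d < r + 1) := fun hc => h (a / d) hc heq
      right; omega
    · left; exact fun hc => hdvd hc

-- ===== VERDICT (by name: the statement is the Claim_ definition above) =====
theorem solution_spec : Claim_equal_solution := by
  intro arr left right _
  unfold Spec_solution solution solution_alt
  rw [PySem.List.enumerate_eq_map_pyRange arr 0, List.map_map]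
  have hlen : (PySem.List.len arr) = (arr.length : Int) := PySem.List.len_eq arr
  rw [hlen]
  apply List.map_congr_left
  intro i hi
  rw [PySem.List.mem_pyRange_one] at hi
  exact pv_any_eq_divtest (PySem.List.pyGetD arr i 0) (i + 1) left right (by omega)
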